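-- pv_equiv track=rewrite | github.com/sshrik/GuitarSchool | showCode.py | makeHandShape
-- ===== SOURCE A (Python) =====
-- def makeHandShape(handLoc):
--     '''
--     '''
--     high = 0
--     low = 36
--     # Real scale of Hand Shape.
--     handShape = []
--
--     for loc in handLoc:
--         if loc > high:
--             high = loc
--         if loc < low and loc != -1:
--             low = loc
--
--     for _ in range(low, high + 1):
--         handShape.append([0, 0, 0, 0, 0, 0])
--
--     for i in range(0, 6):
--         if handLoc[i] != -1:
--             handShape[handLoc[i] - low][i] = 1
--     return high, low, handShape
-- ===== SOURCE B (Python) =====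
-- def makeHandShape(handLoc):
--     high = max(handLoc + [0])
--     low = min([l for l in handLoc if l != -1] + [36])
--     handShape = [[1 if handLoc[i] != -1 and handLoc[i] == row else 0 for i in range(6)]
--                  for row in range(low, high + 1)]
--     return high, low, handShape
-- ===== Notes on version B (the rewrite author's own statement) =====
-- stated objective: alternative
-- what changed: Replaces A's running min/max scan and per-finger indexed assignments into a preallocated zero grid by max/min over (filtered) list copies and a nested per-cell comprehension that scans the six fingers for every fret row.
import Mathlib
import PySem

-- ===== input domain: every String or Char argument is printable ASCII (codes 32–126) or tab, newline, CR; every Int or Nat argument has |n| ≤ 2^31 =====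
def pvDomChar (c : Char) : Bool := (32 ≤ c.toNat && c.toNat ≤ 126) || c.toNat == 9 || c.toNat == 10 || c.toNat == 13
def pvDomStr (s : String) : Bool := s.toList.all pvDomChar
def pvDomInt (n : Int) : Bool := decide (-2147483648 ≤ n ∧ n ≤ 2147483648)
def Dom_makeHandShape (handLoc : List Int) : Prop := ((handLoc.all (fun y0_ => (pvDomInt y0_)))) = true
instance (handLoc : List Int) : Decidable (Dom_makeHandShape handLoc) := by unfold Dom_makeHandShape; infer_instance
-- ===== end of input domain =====

-- B replaces A's running min/max loop and indexed cell assignments by max/min builtins and a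
-- per-cell nested comprehension over fret rows (objective: alternative decomposition, same cost).

-- ===== PORT A =====
-- the min/max scan of A's first loop, one step
def pvStepHL (p : Int × Int) (loc : Int) : Int × Int :=
  (if loc > p.1 then loc else p.1, if loc < p.2 ∧ loc ≠ -1 then loc else p.2)

-- A's third loop body: handShape[handLoc[i] - low][i] = 1 (guarded by handLoc[i] != -1)
def pvUpd (handLoc : List Int) (low : Int) (hs : List (List Int)) (i : Int) : List (List Int) :=
  if PySem.List.pyGetD handLoc i 0 ≠ -1 then
    PySem.List.pySetD hs (PySem.List.pyGetD handLoc i 0 - low)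
      (PySem.List.pySetD (PySem.List.pyGetD hs (PySem.List.pyGetD handLoc i 0 - low) []) i 1)
  else hs

def makeHandShape (handLoc : List Int) : Int × Int × List (List Int) :=
  let hl := handLoc.foldl pvStepHL (0, 36)
  let handShape := (PySem.List.pyRange hl.2 (hl.1 + 1) 1).foldl
      (fun acc _ => acc ++ [[0, 0, 0, 0, 0, 0]]) []
  let handShape2 := (PySem.List.pyRange 0 6 1).foldl (pvUpd handLoc hl.2) handShape
  (hl.1, hl.2, handShape2)

-- ===== PORT B =====
-- the cell comprehension value: 1 if l != -1 and l == row else 0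
def pvCell (row l : Int) : Int := if l ≠ -1 ∧ l = row then 1 else 0

def makeHandShape_alt (handLoc : List Int) : Int × Int × List (List Int) :=
  let high := (PySem.List.max? (handLoc ++ [0]) (fun x => x)).getD 0
  let low := (PySem.List.min? (handLoc.filter (fun l => decide (l ≠ -1)) ++ [36]) (fun x => x)).getD 36
  let handShape := (PySem.List.pyRange low (high + 1) 1).map
      (fun row => (PySem.List.pyRange 0 6 1).map
        (fun i => pvCell row (PySem.List.pyGetD handLoc i 0)))
  (high, low, handShape)

-- ===== PRECONDITION & SPEC =====
-- A indexes handLoc[0..5] unconditionally, so it raises IndexError on lists shorter than 6.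
def Pre_makeHandShape (handLoc : List Int) : Prop := 6 ≤ handLoc.length
instance (handLoc : List Int) : Decidable (Pre_makeHandShape handLoc) := by
  unfold Pre_makeHandShape; infer_instance

def pvWitness_makeHandShape : List Int := [1, 3, -1, 2, 0, -1]

def Spec_makeHandShape (handLoc : List Int) (out : Int × Int × List (List Int)) : Prop := out = makeHandShape_alt handLoc
instance (handLoc : List Int) (out : Int × Int × List (List Int)) : Decidable (Spec_makeHandShape handLoc out) := by unfold Spec_makeHandShape; infer_instance

-- ===== CLAIM (what is proved, stated in full; the proofs are below) =====
def Claim_equal_makeHandShape : Prop := ∀ (handLoc : List Int), Dom_makeHandShape handLoc → Pre_makeHandShape handLoc → Spec_makeHandShape handLoc (makeHandShape handLoc)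

-- ===== LEMMAS AND PROOFS =====

lemma foldl_stepHL (xs : List Int) (p : Int × Int) :
    xs.foldl pvStepHL p =
      (xs.foldl (fun h loc => max h loc) p.1,
       xs.foldl (fun l loc => if loc ≠ -1 then min l loc else l) p.2) := by
  induction xs generalizing p with
  | nil => rfl
  | cons x t ih =>
    simp only [List.foldl_cons, ih]
    have h1 : (pvStepHL p x).1 = max p.1 x := by
      simp only [pvStepHL]; rw [max_def]; split_ifs <;> omega
    have h2 : (pvStepHL p x).2 = if x ≠ -1 then min p.2 x else p.2 := by
      simp only [pvStepHL]
      by_cases hx : x = -1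
      · simp [hx]
      · rw [if_pos hx, min_def]; split_ifs <;> omega
    rw [h1, h2]

lemma foldl_max_shift (xs : List Int) (a b : Int) :
    xs.foldl max (max a b) = max a (xs.foldl max b) := by
  induction xs generalizing b with
  | nil => rfl
  | cons x t ih =>
    simp only [List.foldl_cons, max_assoc, ih]

lemma foldl_min_shift (xs : List Int) (a b : Int) :
    xs.foldl min (min a b) = min a (xs.foldl min b) := by
  induction xs generalizing b with
  | nil => rfl
  | cons x t ih =>
    simp only [List.foldl_cons, min_assoc, ih]

lemma high_char (xs : List Int) :
    (PySem.List.max? (xs ++ [0]) (fun x => x)).getD 0 = xs.foldl max 0 := by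
  cases xs with
  | nil => rfl
  | cons x t =>
    rw [List.cons_append, PySem.List.max?_id_cons]
    simp only [Option.getD_some, List.foldl_append, List.foldl_cons, List.foldl_nil]
    rw [max_comm _ 0, foldl_max_shift]

lemma low_filter (xs : List Int) (init : Int) :
    xs.foldl (fun l loc => if loc ≠ -1 then min l loc else l) init
      = (xs.filter (fun l => decide (l ≠ -1))).foldl min init := by
  induction xs generalizing init with
  | nil => rfl
  | cons x t ih =>
    rw [List.foldl_cons, List.filter_cons]
    by_cases hx : x = -1
    · rw [if_neg (fun h => h hx), if_neg (by simp [hx])]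
      exact ih init
    · rw [if_pos hx, if_pos (by simp [hx]), List.foldl_cons]
      exact ih (min init x)

lemma low_char (xs : List Int) :
    (PySem.List.min? (xs.filter (fun l => decide (l ≠ -1)) ++ [36]) (fun x => x)).getD 36
      = xs.foldl (fun l loc => if loc ≠ -1 then min l loc else l) 36 := by
  rw [low_filter]
  cases h : xs.filter (fun l => decide (l ≠ -1)) with
  | nil => rfl
  | cons y t =>
    rw [List.cons_append, PySem.List.min?_id_cons]
    simp only [Option.getD_some, List.foldl_append, List.foldl_cons, List.foldl_nil]
    rw [min_comm _ 36, foldl_min_shift]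

lemma foldl_min_le_init (xs : List Int) (a : Int) : xs.foldl min a ≤ a := by
  induction xs generalizing a with
  | nil => simp
  | cons z u ih =>
    exact le_trans (ih (min a z)) (min_le_left _ _)

lemma le_foldl_max_init (xs : List Int) (a : Int) : a ≤ xs.foldl max a := by
  induction xs generalizing a with
  | nil => simp
  | cons z u ih =>
    exact le_trans (le_max_left _ _) (ih (max a z))

lemma foldl_min_le_mem (xs : List Int) (a x : Int) (hx : x ∈ xs) :
    xs.foldl min a ≤ x := by
  induction xs generalizing a with
  | nil => cases hx
  | cons y t ih =>
    rcases List.mem_cons.mp hx with h | h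
    · subst h
      exact le_trans (foldl_min_le_init t (min a x)) (min_le_right _ _)
    · exact ih _ h

lemma le_foldl_max_mem (xs : List Int) (a x : Int) (hx : x ∈ xs) :
    x ≤ xs.foldl max a := by
  induction xs generalizing a with
  | nil => cases hx
  | cons y t ih =>
    rcases List.mem_cons.mp hx with h | h
    · subst h
      exact le_trans (le_max_right _ _) (le_foldl_max_init t (max a x))
    · exact ih _ h

lemma foldl_append_zeros (l : List Int) (init : List (List Int)) :
    l.foldl (fun acc _ => acc ++ [[0, 0, 0, 0, 0, 0]]) init
      = init ++ List.replicate l.length ([0, 0, 0, 0, 0, 0] : List Int) := by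
  induction l generalizing init with
  | nil => simp
  | cons x t ih =>
    rw [List.foldl_cons, ih, List.append_assoc, List.length_cons, List.replicate_succ]
    rfl

lemma set_append_len {α : Type} (xs ys : List α) (n : Nat) (v : α) (h : n = xs.length) :
    (xs ++ ys).set n v = xs ++ ys.set 0 v := by
  subst h
  induction xs with
  | nil => simp
  | cons x t ih => simp [ih]

lemma grid_inv (handLoc : List Int) (hlen : 6 ≤ handLoc.length) (low high : Int)
    (hlow : ∀ x ∈ handLoc, x ≠ -1 → low ≤ x)
    (hhigh : ∀ x ∈ handLoc, x ≤ high) :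
    ∀ k : Nat, k ≤ 6 →
      (PySem.List.pyRange 0 (k : Int) 1).foldl (pvUpd handLoc low)
          ((PySem.List.pyRange low (high + 1) 1).map (fun _ => List.replicate 6 (0 : Int)))
        = (PySem.List.pyRange low (high + 1) 1).map
            (fun row => (handLoc.take k).map (fun l => pvCell row l)
              ++ List.replicate (6 - k) (0 : Int)) := by
  intro k
  induction k with
  | zero =>
    intro _
    rw [show ((0 : Nat) : Int) = 0 by norm_num, PySem.List.pyRange_one_eq_nil (a := 0) (b := 0) (by omega)]
    simp
  | succ k ih =>
    intro hk6
    have hkl : k < handLoc.length := by omega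
    have hG := ih (by omega)
    rw [show (((k+1 : Nat)) : Int) = (k : Int) + 1 by push_cast; ring,
        PySem.List.pyRange_one_succ_right (a := 0) (b := (k : Int)) (by positivity), List.foldl_append, hG]
    simp only [List.foldl_cons, List.foldl_nil]
    have hget : PySem.List.pyGetD handLoc ((k : Int)) 0 = handLoc[k] := by
      rw [PySem.List.pyGetD_natCast, List.getD_eq_getElem _ _ hkl]
    have htake : handLoc.take (k+1) = handLoc.take k ++ [handLoc[k]] := by
      rw [List.take_add_one, List.getElem?_eq_getElem hkl]
      rfl
    by_cases he : handLoc[k] = -1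
    · rw [pvUpd, if_neg (by rw [hget]; omega)]
      apply List.map_congr_left
      intro row _
      rw [htake, List.map_append, List.append_assoc]
      congr 1
      rw [show 6 - k = (6 - (k+1)) + 1 by omega, List.replicate_succ]
      simp [pvCell, he]
    · -- the update hits row handLoc[k] - low, column k
      set e := handLoc[k] with hedef
      have hmem : e ∈ handLoc := List.getElem_mem hkl
      have hle : low ≤ e := hlow e hmem he
      have hge : e ≤ high := hhigh e hmem
      set rng := PySem.List.pyRange low (high + 1) 1 with hrng
      have hlenr : rng.length = (high + 1 - low).toNat := PySem.List.length_pyRange_one _ _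
      have hr : ((e - low).toNat : Int) = e - low := by omega
      have hrlt : (e - low).toNat < rng.length := by omega
      rw [pvUpd, if_pos (by rw [hget]; omega), hget]
      have hrow : PySem.List.pyGetD (rng.map (fun row => (handLoc.take k).map (fun l => pvCell row l) ++ List.replicate (6 - k) (0 : Int))) (e - low) []
          = (handLoc.take k).map (fun l => pvCell e l) ++ List.replicate (6 - k) (0 : Int) := by
        rw [PySem.List.pyGetD_eq_getElem (h0 := by omega) (h1 := by rw [List.length_map, hlenr]; omega)]
        rw [List.getElem_map]
        simp only [hrng, PySem.List.getElem_pyRange_one]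
        rw [show low + ((e - low).toNat : Int) = e by omega]
      rw [hrow]
      have hklen' : ((handLoc.take k).map (fun l => pvCell e l)).length = k := by
        simp [List.length_take]; omega
      have hinner : PySem.List.pySetD ((handLoc.take k).map (fun l => pvCell e l) ++ List.replicate (6 - k) (0 : Int)) ((k : Int)) 1
          = (handLoc.take k).map (fun l => pvCell e l) ++ (1 : Int) :: List.replicate (6 - (k+1)) (0 : Int) := by
        rw [PySem.List.pySetD_natCast]
        rw [set_append_len _ _ _ _ hklen'.symm]
        congr 1
        rw [show 6 - k = (6 - (k+1)) + 1 by omega, List.replicate_succ, List.set_cons_zero]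
      rw [hinner, PySem.List.pySetD_of_nonneg _ _ (by omega)]
      apply List.ext_getElem
      · simp [hlenr]
      · intro j hj1 hj2
        rw [List.getElem_set, List.getElem_map]
        have hjlen : j < rng.length := by simpa using hj1
        by_cases hjr : (e - low).toNat = j
        · rw [if_pos hjr, List.getElem_map]
          simp only [hrng, PySem.List.getElem_pyRange_one]
          rw [show low + (j : Int) = e by omega, htake, List.map_append]
          simp [pvCell, he]
        · rw [if_neg hjr, List.getElem_map]
          simp only [hrng, PySem.List.getElem_pyRange_one]
          rw [htake, List.map_append, List.append_assoc]
          congr 1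
          have hce : pvCell (low + (j : Int)) e = 0 := by
            rw [pvCell, if_neg]
            intro hcon
            exact hjr (by omega)
          simp only [List.map_cons, List.map_nil, hce]
          rw [show 6 - k = (6 - (k+1)) + 1 by omega, List.replicate_succ]
          rfl

-- ===== VERDICT (by name: the statement is the Claim_ definition above) =====
lemma high_eq (handLoc : List Int) :
    (handLoc.foldl pvStepHL (0, 36)).1
      = (PySem.List.max? (handLoc ++ [0]) (fun x => x)).getD 0 := by
  rw [foldl_stepHL, high_char]

lemma low_eq (handLoc : List Int) :
    (handLoc.foldl pvStepHL (0, 36)).2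
      = (PySem.List.min? (handLoc.filter (fun l => decide (l ≠ -1)) ++ [36]) (fun x => x)).getD 36 := by
  rw [foldl_stepHL, low_char]

theorem makeHandShape_spec : Claim_equal_makeHandShape := by
  intro handLoc _ hpre
  unfold Spec_makeHandShape
  have hlen : 6 ≤ handLoc.length := hpre
  simp only [makeHandShape, makeHandShape_alt]
  rw [← high_eq, ← low_eq]
  set high := (handLoc.foldl pvStepHL (0, 36)).1 with hhighdef
  set low := (handLoc.foldl pvStepHL (0, 36)).2 with hlowdef
  have hhighc : high = handLoc.foldl max 0 := by rw [hhighdef, foldl_stepHL]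
  have hlowc : low = (handLoc.filter (fun l => decide (l ≠ -1))).foldl min 36 := by
    rw [hlowdef, foldl_stepHL, low_filter]
  refine Prod.ext rfl (Prod.ext rfl ?_)
  have hlow : ∀ x ∈ handLoc, x ≠ -1 → low ≤ x := by
    intro x hx hne
    rw [hlowc]
    exact foldl_min_le_mem _ _ _ (List.mem_filter.mpr ⟨hx, by simp [hne]⟩)
  have hhigh : ∀ x ∈ handLoc, x ≤ high := by
    intro x hx
    rw [hhighc]
    exact le_foldl_max_mem _ _ _ hx
  have hzeros : (PySem.List.pyRange low (high + 1) 1).foldl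
      (fun acc _ => acc ++ [[0, 0, 0, 0, 0, 0]]) ([] : List (List Int))
      = (PySem.List.pyRange low (high + 1) 1).map (fun _ => List.replicate 6 (0 : Int)) := by
    rw [foldl_append_zeros, List.nil_append, List.map_const']
    rfl
  rw [hzeros]
  have hinv := grid_inv handLoc hlen low high hlow hhigh 6 (le_refl 6)
  rw [show ((6 : Nat) : Int) = 6 by norm_num] at hinv
  rw [hinv]
  apply List.map_congr_left
  intro row _
  rw [Nat.sub_self, List.replicate_zero, List.append_nil]
  have hstep1 : (PySem.List.pyRange 0 6 1).map (fun i => pvCell row (PySem.List.pyGetD handLoc i 0))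
      = (PySem.List.pyRange 0 6 1).map (fun i => pvCell row (PySem.List.pyGetD (handLoc.take 6) i 0)) := by
    apply List.map_congr_left
    intro i hi
    obtain ⟨hi0, hi6⟩ := (PySem.List.mem_pyRange_one).mp hi
    rw [PySem.List.pyGetD_eq_getElem (h0 := hi0) (h1 := by omega),
        PySem.List.pyGetD_eq_getElem (h0 := hi0) (h1 := by simp [List.length_take]; omega),
        List.getElem_take]
  have h6 : ((handLoc.take 6).length : Int) = 6 := by simp [List.length_take]; omega
  have hstep2 : (PySem.List.pyRange 0 6 1).map (fun i => PySem.List.pyGetD (handLoc.take 6) i 0)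
      = handLoc.take 6 := by
    rw [← h6, PySem.List.map_pyGetD_pyRange_zero']
  rw [hstep1,
      show (fun i => pvCell row (PySem.List.pyGetD (handLoc.take 6) i 0))
        = ((fun l => pvCell row l) ∘ (fun i => PySem.List.pyGetD (handLoc.take 6) i 0)) from rfl,
      ← List.map_map, hstep2]
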